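-- pv_equiv track=rewrite | github.com/DPFNeiland/Python-Environment | 2semestre/Atividade2/e4.py | Calcular_Quantidade_Total_Vendida
-- ===== SOURCE A (Python) =====
-- def Calcular_Quantidade_Total_Vendida(vendas: list[list]) -> dict:
--     qtd_por_item = {}
--
--     items = []
--
--     for venda_do_dia in vendas:
--         for venda in venda_do_dia:
--             if venda in items:
--                 qtd_por_item[venda] += 1
--             else:
--                 qtd_por_item[venda] = 1
--                 items.append(venda)
--
--     return qtd_por_item
-- ===== SOURCE B (Python) =====
-- def Calcular_Quantidade_Total_Vendida(vendas: list[list]) -> dict: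
--     flat = [v for dia in vendas for v in dia]
--     return {v: flat.count(v) for v in dict.fromkeys(flat)}
-- ===== Notes on version B (the rewrite author's own statement) =====
-- stated objective: simpler
-- what changed: Replaces the accumulating dict+membership-list pass with a flatten, an ordered dedup of the keys, and a per-key count pass (dict comprehension).
import Mathlib
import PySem

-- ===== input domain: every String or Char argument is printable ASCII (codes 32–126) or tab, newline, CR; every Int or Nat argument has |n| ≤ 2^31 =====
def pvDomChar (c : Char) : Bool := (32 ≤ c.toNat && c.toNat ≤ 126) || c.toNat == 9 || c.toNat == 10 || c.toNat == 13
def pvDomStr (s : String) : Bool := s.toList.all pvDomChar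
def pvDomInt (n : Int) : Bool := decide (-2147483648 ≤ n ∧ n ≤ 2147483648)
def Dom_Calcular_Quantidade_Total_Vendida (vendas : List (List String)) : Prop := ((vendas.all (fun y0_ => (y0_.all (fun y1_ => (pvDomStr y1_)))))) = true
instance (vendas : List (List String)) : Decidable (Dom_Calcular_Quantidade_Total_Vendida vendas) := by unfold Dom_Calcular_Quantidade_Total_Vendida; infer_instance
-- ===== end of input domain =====

-- B replaces A's accumulating dict-plus-membership-list pass by flatten, ordered key dedup and a per-key count (simpler; same return value).

-- ===== PORT A =====
-- state: (qtd_por_item, items); 'qtd_por_item[venda] += 1' is Dict.modify venda 0 (· + 1)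
-- (exact here: the key is always present in that branch, so the default 0 is never used and no KeyError occurs)
def Calcular_Quantidade_Total_Vendida (vendas : List (List String)) : List (String × Int) :=
  (vendas.foldl
    (fun (st : PySem.Dict String Int × List String) venda_do_dia =>
      venda_do_dia.foldl
        (fun st venda =>
          if st.2.contains venda then
            (st.1.modify venda 0 (· + 1), st.2)
          else
            (st.1.insert venda 1, st.2 ++ [venda]))
        st)
    (PySem.Dict.empty, [])).1.items

-- ===== PORT B =====
def Calcular_Quantidade_Total_Vendida_alt (vendas : List (List String)) : List (String × Int) :=
  let flat := vendas.flatMap (fun dia => dia)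
  (PySem.List.dedup flat).map (fun v => (v, (PySem.List.count flat v : Int)))

-- ===== PRECONDITION & SPEC =====
def Spec_Calcular_Quantidade_Total_Vendida (vendas : List (List String)) (out : List (String × Int)) : Prop := out = Calcular_Quantidade_Total_Vendida_alt vendas
instance (vendas : List (List String)) (out : List (String × Int)) : Decidable (Spec_Calcular_Quantidade_Total_Vendida vendas out) := by unfold Spec_Calcular_Quantidade_Total_Vendida; infer_instance

-- ===== CLAIM (what is proved, stated in full; the proofs are below) =====
def Claim_equal_Calcular_Quantidade_Total_Vendida : Prop := ∀ (vendas : List (List String)), Dom_Calcular_Quantidade_Total_Vendida vendas → Spec_Calcular_Quantidade_Total_Vendida vendas (Calcular_Quantidade_Total_Vendida vendas)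

-- ===== LEMMAS AND PROOFS =====

-- A's per-element step
def pvStepA (st : PySem.Dict String Int × List String) (venda : String) : PySem.Dict String Int × List String :=
  if st.2.contains venda then
    (st.1.modify venda 0 (· + 1), st.2)
  else
    (st.1.insert venda 1, st.2 ++ [venda])

-- nested loop = single loop over the flattened list
theorem pvFoldA_flat (vendas : List (List String)) (st : PySem.Dict String Int × List String) :
    vendas.foldl (fun st dia => dia.foldl pvStepA st) st
      = (vendas.flatMap (fun dia => dia)).foldl pvStepA st := by
  induction vendas generalizing st with
  | nil => rfl
  | cons d rest ih => simp [List.flatMap_cons, List.foldl_append, ih]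

-- given items = keys, A's step is the Counter step and items stays the keys
theorem pvFoldA_counter (l : List String) (st : PySem.Dict String Int × List String)
    (h : st.2 = st.1.keys) :
    l.foldl pvStepA st
      = (l.foldl (fun d x => d.modify x 0 (· + 1)) st.1,
         (l.foldl (fun d x => d.modify x 0 (· + 1)) st.1).keys) := by
  induction l generalizing st with
  | nil => cases st; simp_all
  | cons x xs ih =>
    simp only [List.foldl_cons]
    by_cases hc : st.2.contains x = true
    · have hcd : st.1.contains x = true := by
        rw [PySem.Dict.contains_eq_decide_mem_keys]; rw [h] at hc; simpa using hc
      have h2 : (st.1.modify x 0 (· + 1)).keys = st.1.keys := by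
        rw [PySem.Dict.keys_modify, PySem.Dict.keys_insert_of_contains _ _ hcd]
      rw [show pvStepA st x = (st.1.modify x 0 (· + 1), st.2) from by unfold pvStepA; rw [if_pos hc]]
      exact ih _ (by rw [h, h2])
    · have hcd : st.1.contains x = false := by
        rw [PySem.Dict.contains_eq_decide_mem_keys]; rw [h] at hc; simpa using hc
      have hmod : st.1.modify x 0 (· + 1) = st.1.insert x 1 := by
        show st.1.insert x (st.1.getD x 0 + 1) = _
        rw [PySem.Dict.getD_of_not_contains _ _ hcd, zero_add]
      have h2 : (st.1.insert x 1).keys = st.1.keys ++ [x] :=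
        PySem.Dict.keys_insert_of_not_contains _ _ hcd
      rw [show pvStepA st x = (st.1.insert x 1, st.2 ++ [x]) from by unfold pvStepA; rw [if_neg hc]]
      rw [ih _ (by rw [h, h2]), hmod]

-- ===== VERDICT (by name: the statement is the Claim_ definition above) =====
theorem Calcular_Quantidade_Total_Vendida_spec : Claim_equal_Calcular_Quantidade_Total_Vendida := by
  intro vendas _
  unfold Spec_Calcular_Quantidade_Total_Vendida Calcular_Quantidade_Total_Vendida
    Calcular_Quantidade_Total_Vendida_alt
  rw [show (fun (st : PySem.Dict String Int × List String) venda =>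
        if st.2.contains venda then (st.1.modify venda 0 (· + 1), st.2)
        else (st.1.insert venda 1, st.2 ++ [venda])) = pvStepA from rfl]
  rw [pvFoldA_flat, pvFoldA_counter _ _ (PySem.Dict.keys_empty).symm]
  rw [← PySem.Dict.counter_eq_foldl, PySem.Dict.items_counter]
  simp [PySem.List.dedup_eq_ofList, PySem.List.count_eq]
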